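-- pv_equiv track=rewrite | github.com/thomasguo42/AI_Online_Software | your_scripts/bout_analysis.py | extract_intervals_with_indices
-- ===== SOURCE A (Python) =====
-- def extract_intervals_with_indices(movement_labels, frame_indices):
--     """
--     FIXED: Extract intervals and convert to real frame indices
--
--     Parameters:
--     - movement_labels: Array of movement labels
--     - frame_indices: Array of real frame numbers (or None for row indices)
--
--     Returns:
--     - List of (start_frame, end_frame, label) tuples using REAL frame indices
--     """
--     if len(movement_labels) == 0:
--         return []
--
--     intervals = []
--     current_label = movement_labels[0]
--     start_row = 0
--
--     for i in range(1, len(movement_labels)):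
--         if movement_labels[i] != current_label:
--             # Convert row indices to real frame indices
--             if frame_indices is not None:
--                 start_frame = int(frame_indices[start_row])
--                 end_frame = int(frame_indices[i-1])
--             else:
--                 start_frame = start_row
--                 end_frame = i-1
--
--             intervals.append((start_frame, end_frame, current_label))
--             start_row = i
--             current_label = movement_labels[i]
--
--     # Add the last interval
--     if frame_indices is not None:
--         start_frame = int(frame_indices[start_row])
--         end_frame = int(frame_indices[len(movement_labels)-1])
--     else:
--         start_frame = start_row
--         end_frame = len(movement_labels)-1
--
--     intervals.append((start_frame, end_frame, current_label))
--
--     return intervals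
-- ===== SOURCE B (Python) =====
-- def extract_intervals_with_indices(movement_labels, frame_indices):
--     n = len(movement_labels)
--     if n == 0:
--         return []
--     # phase 1: boundary indices (start of each run, plus n as a sentinel)
--     bounds = [0] + [i for i in range(1, n) if movement_labels[i] != movement_labels[i - 1]] + [n]
--     # phase 2: one interval per consecutive boundary pair
--     intervals = []
--     for s, nb in zip(bounds, bounds[1:]):
--         e = nb - 1
--         label = movement_labels[s]
--         if frame_indices is not None:
--             intervals.append((int(frame_indices[s]), int(frame_indices[e]), label))
--         else:
--             intervals.append((s, e, label))
--     return intervals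
-- ===== Notes on version B (the rewrite author's own statement) =====
-- stated objective: alternative
-- what changed: Replaced A's single emit-on-change scan carrying (intervals, current_label, start_row) state by a two-phase decomposition: first compute the list of run-boundary indices, then build one interval per consecutive boundary pair.
-- outside the precondition, e.g. on extract_intervals_with_indices([1, 1], [5]): A raises IndexError, B raises IndexError
import Mathlib
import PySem

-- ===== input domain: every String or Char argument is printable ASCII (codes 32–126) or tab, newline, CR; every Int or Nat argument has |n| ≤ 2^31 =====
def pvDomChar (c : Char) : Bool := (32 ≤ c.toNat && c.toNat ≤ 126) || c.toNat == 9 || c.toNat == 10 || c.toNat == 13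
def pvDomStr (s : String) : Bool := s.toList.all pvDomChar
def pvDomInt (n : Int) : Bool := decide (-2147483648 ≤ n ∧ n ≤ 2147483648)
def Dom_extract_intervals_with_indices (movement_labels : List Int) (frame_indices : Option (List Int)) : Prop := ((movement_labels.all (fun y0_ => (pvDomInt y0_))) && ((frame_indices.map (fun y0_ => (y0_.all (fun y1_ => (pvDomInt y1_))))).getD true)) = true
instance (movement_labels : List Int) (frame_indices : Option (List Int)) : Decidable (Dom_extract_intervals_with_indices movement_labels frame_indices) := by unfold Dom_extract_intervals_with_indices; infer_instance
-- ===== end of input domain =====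

-- B restructures A's emit-on-change scan as boundary-finding followed by interval construction (alternative decomposition, same cost).
-- All list indices both programs use are nonnegative and (under Pre_) in range, so they are ported with List.getD.

-- ===== PORT A =====
-- the loop body of A's `for i in range(1, len(movement_labels))`
def pvStepA (l : List Int) (fi : Option (List Int))
    (st : List (Int × Int × Int) × Int × Nat) (i : Nat) :
    List (Int × Int × Int) × Int × Nat :=
  if l.getD i 0 ≠ st.2.1 then
    let sf : Int := match fi with | some f => f.getD st.2.2 0 | none => (st.2.2 : Int)
    let ef : Int := match fi with | some f => f.getD (i - 1) 0 | none => ((i - 1 : Nat) : Int)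
    (st.1 ++ [(sf, ef, st.2.1)], l.getD i 0, i)
  else st

def extract_intervals_with_indices (movement_labels : List Int) (frame_indices : Option (List Int)) : List (Int × Int × Int) :=
  if movement_labels.length = 0 then []
  else
    -- range(1, n) ported as List.range' 1 (n-1); exact since n ≥ 1 here
    let fin := (List.range' 1 (movement_labels.length - 1)).foldl
      (pvStepA movement_labels frame_indices) ([], movement_labels.getD 0 0, 0)
    let sf : Int := match frame_indices with | some f => f.getD fin.2.2 0 | none => (fin.2.2 : Int)
    let ef : Int := match frame_indices with
      | some f => f.getD (movement_labels.length - 1) 0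
      | none => ((movement_labels.length - 1 : Nat) : Int)
    fin.1 ++ [(sf, ef, fin.2.1)]

-- ===== PORT B =====
-- the interval built for one boundary pair (s, nb) in Source B's loop
def pvEmit (l : List Int) (fi : Option (List Int)) (s e : Nat) : Int × Int × Int :=
  match fi with
  | some f => (f.getD s 0, f.getD e 0, l.getD s 0)
  | none => ((s : Int), (e : Int), l.getD s 0)

def extract_intervals_with_indices_alt (movement_labels : List Int) (frame_indices : Option (List Int)) : List (Int × Int × Int) :=
  let n := movement_labels.length
  if n = 0 then []
  else
    let bounds : List Nat :=
      0 :: (((List.range' 1 (n - 1)).filter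
              (fun i => movement_labels.getD i 0 != movement_labels.getD (i - 1) 0)) ++ [n])
    (bounds.zip bounds.tail).map
      (fun p => pvEmit movement_labels frame_indices p.1 (p.2 - 1))

-- ===== PRECONDITION & SPEC =====
-- Pre_ excludes only inputs where Python A raises IndexError: a non-empty label list with a
-- shorter frame_indices list (B raises there too).
def Pre_extract_intervals_with_indices (movement_labels : List Int) (frame_indices : Option (List Int)) : Prop :=
  (frame_indices.all
    (fun f => movement_labels.isEmpty || decide (movement_labels.length ≤ f.length))) = true
instance (movement_labels : List Int) (frame_indices : Option (List Int)) : Decidable (Pre_extract_intervals_with_indices movement_labels frame_indices) := by unfold Pre_extract_intervals_with_indices; infer_instance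

def pvWitness_extract_intervals_with_indices : List Int × Option (List Int) := ([1, 1, 2], some [10, 11, 12])

def Spec_extract_intervals_with_indices (movement_labels : List Int) (frame_indices : Option (List Int)) (out : List (Int × Int × Int)) : Prop := out = extract_intervals_with_indices_alt movement_labels frame_indices
instance (movement_labels : List Int) (frame_indices : Option (List Int)) (out : List (Int × Int × Int)) : Decidable (Spec_extract_intervals_with_indices movement_labels frame_indices out) := by unfold Spec_extract_intervals_with_indices; infer_instance

-- ===== CLAIM (what is proved, stated in full; the proofs are below) =====
def Claim_equal_extract_intervals_with_indices : Prop := ∀ (movement_labels : List Int) (frame_indices : Option (List Int)), Dom_extract_intervals_with_indices movement_labels frame_indices → Pre_extract_intervals_with_indices movement_labels frame_indices → Spec_extract_intervals_with_indices movement_labels frame_indices (extract_intervals_with_indices movement_labels frame_indices)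

-- ===== LEMMAS AND PROOFS =====

-- the change points of l among indices [1, k]
def pvChg (l : List Int) (k : Nat) : List Nat :=
  (List.range' 1 k).filter (fun i => l.getD i 0 != l.getD (i - 1) 0)

lemma pvZip_concat (c : List Nat) (a x : Nat) :
    ((a :: c) ++ [x]).zip (c ++ [x]) = (a :: c).zip c ++ [(c.getLastD a, x)] := by
  induction c generalizing a with
  | nil => rfl
  | cons h t ih =>
    simp only [List.cons_append, List.zip_cons_cons, List.getLastD_cons]
    rw [show (h :: (t ++ [x])).zip (t ++ [x]) = ((h :: t) ++ [x]).zip (t ++ [x]) from rfl, ih h]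

lemma pvChg_succ (l : List Int) (k : Nat) :
    pvChg l (k + 1)
      = pvChg l k ++ (if l.getD (k + 1) 0 ≠ l.getD k 0 then [k + 1] else []) := by
  have hr : List.range' 1 (k + 1) = List.range' 1 k ++ [k + 1] := by
    rw [List.range'_concat]; norm_num; omega
  simp only [pvChg, hr, List.filter_append, List.filter_cons, List.filter_nil]
  simp

lemma pvInv (l : List Int) (fi : Option (List Int)) (k : Nat) :
    (List.range' 1 k).foldl (pvStepA l fi) ([], l.getD 0 0, 0)
      = (((((0 : Nat) :: pvChg l k).zip (pvChg l k)).map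
            (fun p => pvEmit l fi p.1 (p.2 - 1))),
         l.getD ((pvChg l k).getLastD 0) 0,
         (pvChg l k).getLastD 0)
    ∧ l.getD k 0 = l.getD ((pvChg l k).getLastD 0) 0 := by
  induction k with
  | zero => simp [pvChg]
  | succ k ih =>
    obtain ⟨h1, h2⟩ := ih
    have hr : List.range' 1 (k + 1) = List.range' 1 k ++ [1 + k] := by
      rw [List.range'_concat]; norm_num
    rw [hr, List.foldl_append, h1, show 1 + k = k + 1 from Nat.add_comm 1 k,
      pvChg_succ l k]
    by_cases hne : l.getD (k + 1) 0 = l.getD k 0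
    · rw [if_neg (not_not_intro hne)]
      have heq : l.getD (k + 1) 0 = l.getD ((pvChg l k).getLastD 0) 0 := by
        rw [hne]; exact h2
      constructor
      · simp only [List.append_nil, List.foldl_cons, List.foldl_nil, pvStepA]
        rw [if_neg (not_not_intro heq)]
      · rw [List.append_nil, hne]; exact h2
    · rw [if_pos hne]
      have hcur : l.getD (k + 1) 0 ≠ l.getD ((pvChg l k).getLastD 0) 0 := h2 ▸ hne
      constructor
      · simp only [List.foldl_cons, List.foldl_nil, pvStepA, if_pos hcur]
        rw [show (0 : Nat) :: (pvChg l k ++ [k + 1]) = ((0 : Nat) :: pvChg l k) ++ [k + 1]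
              from rfl,
          pvZip_concat (pvChg l k) 0 (k + 1), List.map_append, List.getLastD_concat]
        cases fi <;> simp [pvEmit]
      · rw [List.getLastD_concat]

lemma pvMain (l : List Int) (fi : Option (List Int)) :
    extract_intervals_with_indices l fi = extract_intervals_with_indices_alt l fi := by
  by_cases h0 : l.length = 0
  · simp [extract_intervals_with_indices, extract_intervals_with_indices_alt, h0]
  · obtain ⟨h1, h2⟩ := pvInv l fi (l.length - 1)
    have hfil : (List.range' 1 (l.length - 1)).filter
        (fun i => l.getD i 0 != l.getD (i - 1) 0) = pvChg l (l.length - 1) := rfl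
    simp only [extract_intervals_with_indices, extract_intervals_with_indices_alt,
      if_neg h0, h1, hfil]
    rw [show ((0 : Nat) :: (pvChg l (l.length - 1) ++ [l.length]))
          = (((0 : Nat) :: pvChg l (l.length - 1)) ++ [l.length]) from rfl]
    rw [show ((((0 : Nat) :: pvChg l (l.length - 1)) ++ [l.length]).tail)
          = (pvChg l (l.length - 1) ++ [l.length]) from rfl]
    rw [pvZip_concat (pvChg l (l.length - 1)) 0 l.length, List.map_append]
    cases fi <;> simp [pvEmit]

-- ===== VERDICT (by name: the statement is the Claim_ definition above) =====
theorem extract_intervals_with_indices_spec : Claim_equal_extract_intervals_with_indices := by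
  intro l fi _ _
  unfold Spec_extract_intervals_with_indices
  exact pvMain l fi
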